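-- pv_equiv track=rewrite | github.com/ojso/flask-exts | src/flask_exts/utils/tools.py | iterdecode
-- ===== SOURCE A (Python) =====
-- CHAR_ESCAPE = "."
--
-- CHAR_SEPARATOR = ","
--
-- def iterdecode(value):
--     """
--     Decode enumerable from string presentation as a tuple
--     """
--
--     if not value:
--         return tuple()
--
--     result = []
--     accumulator = ""
--
--     escaped = False
--
--     for c in value:
--         if not escaped:
--             if c == CHAR_ESCAPE:
--                 escaped = True
--                 continue
--             elif c == CHAR_SEPARATOR:
--                 result.append(accumulator)
--                 accumulator = ""
--                 continue
--         else:
--             escaped = False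
--
--         accumulator += c
--
--     result.append(accumulator)
--
--     return tuple(result)
-- ===== SOURCE B (Python) =====
-- CHAR_ESCAPE = "."
--
-- CHAR_SEPARATOR = ","
--
-- def _unescape(chunk):
--     # Decode the escape chars of a separator-free chunk by run-length arithmetic:
--     # chunk.split(CHAR_ESCAPE) puts one escape char between consecutive pieces; a
--     # maximal run of d escape chars contributes d//2 literal escape chars, and an
--     # odd run additionally escapes the next character (which passes through
--     # unchanged) or, at the end of the chunk, leaves the escape open.
--     pieces = chunk.split(CHAR_ESCAPE)
--     out = pieces[0]
--     j = 1
--     n = len(pieces)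
--     while j < n:
--         k = 0
--         while j + k < n and pieces[j + k] == "":
--             k += 1
--         if j + k == n:
--             # chunk ends with a run of k escape chars
--             return out + CHAR_ESCAPE * (k // 2), k % 2 == 1
--         # run of k+1 escape chars followed by the nonempty piece pieces[j+k]
--         out += CHAR_ESCAPE * ((k + 1) // 2) + pieces[j + k]
--         j += k + 1
--     return out, False
--
-- def iterdecode(value):
--     """
--     Decode enumerable from string presentation as a tuple
--     """
--     if not value:
--         return tuple()
--     chunks = value.split(CHAR_SEPARATOR)
--     last = len(chunks) - 1
--     result = []
--     token = ""
--     for idx, chunk in enumerate(chunks):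
--         decoded, open_ = _unescape(chunk)
--         if open_ and idx < last:
--             # the separator at this chunk boundary was escaped: token continues
--             token += decoded + CHAR_SEPARATOR
--         else:
--             result.append(token + decoded)
--             token = ""
--     return tuple(result)
-- ===== Notes on version B (the rewrite author's own statement) =====
-- stated objective: faster
-- what changed: Replaces A's single-pass character state machine (escaped flag + continue) by staged passes: split the string on the separator, decode each chunk's escape runs by run-length parity arithmetic over an escape-char split, and merge adjacent chunks whose boundary separator was escaped (odd trailing escape run).
import Mathlib
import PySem

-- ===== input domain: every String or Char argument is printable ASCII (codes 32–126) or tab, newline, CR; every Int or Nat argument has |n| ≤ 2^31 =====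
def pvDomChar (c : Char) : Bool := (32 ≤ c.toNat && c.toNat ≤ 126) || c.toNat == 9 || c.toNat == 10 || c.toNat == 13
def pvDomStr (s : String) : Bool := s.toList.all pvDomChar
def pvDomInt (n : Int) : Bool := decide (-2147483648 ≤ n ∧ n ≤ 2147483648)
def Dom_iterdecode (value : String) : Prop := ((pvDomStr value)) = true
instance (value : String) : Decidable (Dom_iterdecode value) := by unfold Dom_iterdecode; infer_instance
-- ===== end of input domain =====

-- B replaces A's single-pass escaped-flag state machine by staged passes: split on the
-- separator, decode each chunk's escape runs by run-length arithmetic, and merge chunks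
-- whose boundary separator was escaped (odd trailing escape run). Same O(n), measurably faster
-- in Python (bulk str.split replaces the per-character loop).

-- ===== PORT A =====
-- A's for-loop over characters with state (result, accumulator, escaped)
def iterLoopA : List Char → List String → List Char → Bool → List String
  | [], res, acc, _ => res ++ [String.ofList acc]
  | c :: cs, res, acc, escaped =>
    if escaped = false then
      if c = '.' then iterLoopA cs res acc true
      else if c = ',' then iterLoopA cs (res ++ [String.ofList acc]) [] false
      else iterLoopA cs res (acc ++ [c]) false
    else iterLoopA cs res (acc ++ [c]) false

def iterdecode (value : String) : List String :=
  if value.toList = [] then [] else iterLoopA value.toList [] [] false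

-- ===== PORT B =====
-- hand port of Python's s.split(sep) for a single-character separator (exact for that case:
-- every occurrence cuts, empty pieces are kept, '' gives [''])
def splitC (sep : Char) : List Char → List (List Char)
  | [] => [[]]
  | c :: cs =>
    if c = sep then [] :: splitC sep cs
    else
      match splitC sep cs with
      | [] => [[c]]            -- unreachable: splitC never returns []
      | h :: t => (c :: h) :: t

-- the inner `while` of _unescape: count of leading empty pieces (k)
def leadEmpty : List (List Char) → Nat
  | [] => 0
  | p :: ps => if p = [] then leadEmpty ps + 1 else 0

-- the outer `while` of _unescape over the remaining pieces (j onwards), out accumulated;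
-- k counts the leading empty pieces (the inner `while`), rest is `pieces[j+k:]`
def unescLoop (ps : List (List Char)) (out : List Char) : List Char × Bool :=
  if hps : ps = [] then (out, false)
  else if hk : ps.drop (leadEmpty ps) = [] then
    (out ++ List.replicate (leadEmpty ps / 2) '.', decide (leadEmpty ps % 2 = 1))
  else
    unescLoop (ps.drop (leadEmpty ps)).tail
      (out ++ List.replicate ((leadEmpty ps + 1) / 2) '.' ++ (ps.drop (leadEmpty ps)).head hk)
termination_by ps.length
decreasing_by
  simp only [List.length_tail, List.length_drop]
  have hl : 0 < ps.length := List.length_pos_of_ne_nil (by assumption)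
  omega

-- _unescape: split the chunk on the escape char, then decode runs
def unesc (chunk : List Char) : List Char × Bool :=
  match splitC '.' chunk with
  | [] => ([], false)          -- unreachable: splitC never returns []
  | p0 :: rest => unescLoop rest p0

-- the for-loop of iterdecode over chunks; `rest ≠ []` is Python's `idx < last`
def mergeLoop : List (List Char) → List String → List Char → List String
  | [], res, _ => res
  | ch :: rest, res, token =>
    let du := unesc ch
    if du.2 && !rest.isEmpty then mergeLoop rest res (token ++ du.1 ++ [','])
    else mergeLoop rest (res ++ [String.ofList (token ++ du.1)]) []

def iterdecode_alt (value : String) : List String :=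
  if value.toList = [] then [] else mergeLoop (splitC ',' value.toList) [] []

-- ===== PRECONDITION & SPEC =====
def Spec_iterdecode (value : String) (out : List String) : Prop := out = iterdecode_alt value
instance (value : String) (out : List String) : Decidable (Spec_iterdecode value out) := by unfold Spec_iterdecode; infer_instance

-- ===== CLAIM (what is proved, stated in full; the proofs are below) =====
def Claim_equal_iterdecode : Prop := ∀ (value : String), Dom_iterdecode value → Spec_iterdecode value (iterdecode value)

-- ===== LEMMAS AND PROOFS =====

-- acc-style reformulation of A's machine (the escape flag becomes a two-char consumption)
def g : List Char → List Char → List String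
  | [], acc => [String.ofList acc]
  | c :: cs, acc =>
    if c = '.' then
      match cs with
      | [] => [String.ofList acc]
      | c2 :: cs' => g cs' (acc ++ [c2])
    else if c = ',' then String.ofList acc :: g cs []
    else g cs (acc ++ [c])

theorem iterLoopA_eq_g : ∀ (cs : List Char) (res : List String) (acc : List Char),
    iterLoopA cs res acc false = res ++ g cs acc := by
  intro cs res acc
  induction cs, acc using g.induct generalizing res with
  | case1 acc => simp [iterLoopA, g]
  | case2 acc => simp [iterLoopA, g]
  | case3 acc c2 cs' ih =>
    simp only [iterLoopA, g, if_pos rfl, if_true, reduceIte]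
    exact ih res
  | case4 cs acc h ih =>
    simp only [iterLoopA, reduceIte]
    rw [ih]
    conv_rhs => rw [g.eq_def]
    simp
  | case5 c cs acc hne hnc ih =>
    rw [iterLoopA, g.eq_def]
    simp only [if_neg hne, if_neg hnc, reduceIte]
    exact ih res

-- join of the pieces after the first one: each preceded by one separator
def tj (sep : Char) : List (List Char) → List Char
  | [] => []
  | p :: ps => sep :: (p ++ tj sep ps)

theorem splitC_ne_nil (sep : Char) (cs : List Char) : splitC sep cs ≠ [] := by
  induction cs with
  | nil => simp [splitC]
  | cons c cs ih =>
    simp only [splitC]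
    split
    · simp
    · split
      · simp
      · simp

theorem splitC_join (sep : Char) : ∀ (cs : List Char) (p0 : List Char) (rest : List (List Char)),
    splitC sep cs = p0 :: rest → cs = p0 ++ tj sep rest := by
  intro cs
  induction cs with
  | nil =>
    intro p0 rest h
    simp [splitC] at h
    rw [h.1, h.2]
    simp [tj]
  | cons c cs ih =>
    intro p0 rest h
    simp only [splitC] at h
    split at h
    · rename_i hsep
      subst hsep
      rw [List.cons_eq_cons] at h
      match hs : splitC c cs with
      | [] => exact absurd hs (splitC_ne_nil c cs)
      | q0 :: qrest =>
        rw [hs] at h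
        rw [← h.1, ← h.2, tj]
        simpa using ih q0 qrest hs
    · rename_i hsep
      match hs : splitC sep cs with
      | [] => exact absurd hs (splitC_ne_nil sep cs)
      | q0 :: qrest =>
        rw [hs] at h
        rw [List.cons_eq_cons] at h
        rw [← h.1, ← h.2]
        simpa using ih q0 qrest hs

theorem splitC_mem (sep : Char) : ∀ (cs : List Char) (p : List Char), p ∈ splitC sep cs →
    ∀ c ∈ p, c ∈ cs ∧ c ≠ sep := by
  intro cs
  induction cs with
  | nil => intro p hp c hc; simp [splitC] at hp; subst hp; simp at hc
  | cons a cs ih =>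
    intro p hp c hc
    simp only [splitC] at hp
    split at hp
    · rename_i hsep
      rcases List.mem_cons.mp hp with h | h
      · subst h; simp at hc
      · have := ih p h c hc
        exact ⟨List.mem_cons_of_mem _ this.1, this.2⟩
    · rename_i hsep
      match hs : splitC sep cs with
      | [] => exact absurd hs (splitC_ne_nil sep cs)
      | q0 :: qrest =>
        rw [hs] at hp
        rcases List.mem_cons.mp hp with h | h
        · subst h
          rcases List.mem_cons.mp hc with h2 | h2
          · subst h2; exact ⟨List.mem_cons_self, hsep⟩
          · have := ih q0 (by rw [hs]; exact List.mem_cons_self) c h2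
            exact ⟨List.mem_cons_of_mem _ this.1, this.2⟩
        · have := ih p (by rw [hs]; exact List.mem_cons_of_mem _ h) c hc
          exact ⟨List.mem_cons_of_mem _ this.1, this.2⟩

theorem leadEmpty_struct : ∀ (ps : List (List Char)),
    ps = List.replicate (leadEmpty ps) [] ++ ps.drop (leadEmpty ps) := by
  intro ps
  induction ps with
  | nil => simp [leadEmpty]
  | cons p ps ih =>
    simp only [leadEmpty]
    split
    · rename_i hp
      subst hp
      rw [List.replicate_succ]
      simpa using ih
    · simp

theorem leadEmpty_drop_head : ∀ (ps : List (List Char)) (p : List Char) (ps' : List (List Char)),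
    ps.drop (leadEmpty ps) = p :: ps' → p ≠ [] := by
  intro ps
  induction ps with
  | nil => intro p ps' h; simp at h
  | cons q ps ih =>
    intro p ps' h
    simp only [leadEmpty] at h
    split at h
    · rename_i hq
      rw [List.drop_succ_cons] at h
      exact ih p ps' h
    · rename_i hq
      simp at h
      exact h.1 ▸ hq

-- literal characters just move into the accumulator
theorem g_lit : ∀ (p : List Char), (∀ c ∈ p, c ≠ '.' ∧ c ≠ ',') →
    ∀ (cs acc : List Char), g (p ++ cs) acc = g cs (acc ++ p) := by
  intro p hp
  induction p with
  | nil => simp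
  | cons c p ih =>
    intro cs acc
    have hc := hp c List.mem_cons_self
    simp only [List.cons_append]
    rw [g.eq_def]
    simp only [if_neg hc.1, if_neg hc.2]
    rw [ih (fun c hc => hp c (List.mem_cons_of_mem _ hc)) cs (acc ++ [c])]
    simp

-- an even run of escape chars contributes half as literals
theorem g_dotsPair : ∀ (m : Nat) (cs acc : List Char),
    g (List.replicate (2 * m) '.' ++ cs) acc = g cs (acc ++ List.replicate m '.') := by
  intro m
  induction m with
  | zero => simp
  | succ m ih =>
    intro cs acc
    have h2 : 2 * (m + 1) = 2 * m + 1 + 1 := by ring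
    simp only [h2, List.replicate_succ, List.cons_append]
    rw [g.eq_def]
    simp only [reduceIte]
    rw [ih]
    simp [List.replicate_succ]

theorem unescLoop_eq_done (ps : List (List Char)) (out : List Char) (hne : ps ≠ [])
    (hd : ps.drop (leadEmpty ps) = []) :
    unescLoop ps out = (out ++ List.replicate (leadEmpty ps / 2) '.', decide (leadEmpty ps % 2 = 1)) := by
  rw [unescLoop, dif_neg hne]
  simp only [hd]
  simp

theorem unescLoop_eq_step (ps : List (List Char)) (out : List Char) (p : List Char)
    (ps' : List (List Char)) (hne : ps ≠ []) (hd : ps.drop (leadEmpty ps) = p :: ps') :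
    unescLoop ps out = unescLoop ps' (out ++ List.replicate ((leadEmpty ps + 1) / 2) '.' ++ p) := by
  rw [unescLoop, dif_neg hne]
  simp only [hd]
  simp

theorem tj_replicate_append (sep : Char) : ∀ (k : Nat) (qs : List (List Char)),
    tj sep (List.replicate k [] ++ qs) = List.replicate k sep ++ tj sep qs := by
  intro k
  induction k with
  | zero => simp
  | succ k ih => intro qs; simp [List.replicate_succ, tj, ih]

def okRest (rest0 : List Char) : Prop := rest0 = [] ∨ ∃ rs, rest0 = ',' :: rs

-- the main invariant of B's unescape loop against A's machine
theorem unescLoop_g : ∀ (ps : List (List Char)) (out : List Char),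
    (∀ p ∈ ps, ∀ c ∈ p, c ≠ '.' ∧ c ≠ ',') →
    ∀ (token rest0 : List Char), okRest rest0 →
    g (tj '.' ps ++ rest0) (token ++ out) =
      (match rest0 with
       | [] => [String.ofList (token ++ (unescLoop ps out).1)]
       | _ :: rs =>
         if (unescLoop ps out).2 then g rs (token ++ (unescLoop ps out).1 ++ [','])
         else String.ofList (token ++ (unescLoop ps out).1) :: g rs []) := by
  intro ps out
  induction ps, out using unescLoop.induct with
  | case1 out =>
    intro _ token rest0 hok
    have hu : unescLoop [] out = (out, false) := by rw [unescLoop]; simp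
    rw [hu]
    rcases hok with h | ⟨rs, h⟩ <;> subst h
    · simp [tj, g]
    · simp only [tj, List.nil_append]
      rw [g.eq_def]
      simp
  | case2 ps out hne hd =>
    intro hfree token rest0 hok
    have hu := unescLoop_eq_done ps out hne hd
    have hstruct := leadEmpty_struct ps
    rw [hd, List.append_nil] at hstruct
    have htj : tj '.' ps = List.replicate (leadEmpty ps) '.' := by
      conv_lhs => rw [hstruct]
      rw [show (List.replicate (leadEmpty ps) ([] : List Char))
            = List.replicate (leadEmpty ps) [] ++ [] by simp, tj_replicate_append]
      simp [tj]
    rw [htj, hu]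
    generalize leadEmpty ps = k at *
    rcases Nat.even_or_odd k with he | ho
    · obtain ⟨m, hm⟩ := he
      have hk2 : k = 2 * m := by omega
      have hdiv : k / 2 = m := by omega
      have hmod : ¬ (k % 2 = 1) := by omega
      subst hk2
      rw [g_dotsPair]
      rcases hok with h | ⟨rs, h⟩ <;> subst h
      · simp [g, hdiv]
      · rw [g.eq_def]
        simp [hdiv, hmod]
    · obtain ⟨m, hm⟩ := ho
      have hdiv : k / 2 = m := by omega
      have hmod : k % 2 = 1 := by omega
      subst hm
      rw [show (2 * m + 1) = 2 * m + 1 from rfl, List.replicate_succ', List.append_assoc,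
          List.singleton_append, g_dotsPair]
      rcases hok with h | ⟨rs, h⟩ <;> subst h
      · rw [g.eq_def]
        simp [hdiv]
      · rw [g.eq_def]
        simp only [reduceIte, hmod, hdiv]
        simp [List.append_assoc]
  | case3 ps out hne hk ih =>
    intro hfree token rest0 hok
    obtain ⟨p, ps', hd⟩ := List.exists_cons_of_ne_nil hk
    have hp_ne : p ≠ [] := leadEmpty_drop_head ps p ps' hd
    have hu := unescLoop_eq_step ps out p ps' hne hd
    have hstruct := leadEmpty_struct ps
    rw [hd] at hstruct
    simp only [hd, List.head_cons, List.tail_cons] at ih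
    have hmem_p : p ∈ ps := by rw [hstruct]; simp
    have hfree' : ∀ q ∈ ps', ∀ c ∈ q, c ≠ '.' ∧ c ≠ ',' := by
      intro q hq
      exact hfree q (by rw [hstruct]; simp [hq])
    have hfree_p : ∀ c ∈ p, c ≠ '.' ∧ c ≠ ',' := hfree p hmem_p
    have htj : tj '.' ps = List.replicate (leadEmpty ps) '.' ++ '.' :: (p ++ tj '.' ps') := by
      conv_lhs => rw [hstruct]
      rw [tj_replicate_append]
      simp [tj]
    rw [htj, hu]
    generalize leadEmpty ps = k at *
    rcases Nat.even_or_odd k with he | ho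
    · obtain ⟨m, hm⟩ := he
      have hk2 : k = 2 * m := by omega
      have hdiv : (k + 1) / 2 = m := by omega
      subst hk2
      obtain ⟨pc, ptl, hp⟩ := List.exists_cons_of_ne_nil hp_ne
      rw [List.append_assoc, g_dotsPair]
      rw [g.eq_def]
      simp only [reduceIte, hp, List.cons_append]
      rw [List.append_assoc, g_lit ptl (fun c hc => hfree_p c (by simp [hp, hc]))]
      have := ih hfree' token rest0 hok
      simpa [hp, hdiv, List.append_assoc] using this
    · obtain ⟨m, hm⟩ := ho
      have hdiv : (k + 1) / 2 = m + 1 := by omega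
      subst hm
      rw [show (List.replicate (2 * m + 1) '.' ++ '.' :: (p ++ tj '.' ps')) ++ rest0
            = List.replicate (2 * (m + 1)) '.' ++ (p ++ tj '.' ps' ++ rest0) by
          simp only [show 2 * (m + 1) = (2 * m + 1) + 1 by ring, List.replicate_succ',
            List.append_assoc, List.singleton_append, List.cons_append, List.nil_append]]
      rw [g_dotsPair, List.append_assoc, g_lit p hfree_p]
      have := ih hfree' token rest0 hok
      simpa [hdiv, List.append_assoc] using this

-- same statement for a whole separator-free chunk
theorem g_chunk : ∀ (ch : List Char), (∀ c ∈ ch, c ≠ ',') →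
    ∀ (token rest0 : List Char), okRest rest0 →
    g (ch ++ rest0) token =
      (match rest0 with
       | [] => [String.ofList (token ++ (unesc ch).1)]
       | _ :: rs =>
         if (unesc ch).2 then g rs (token ++ (unesc ch).1 ++ [','])
         else String.ofList (token ++ (unesc ch).1) :: g rs []) := by
  intro ch hcomma token rest0 hok
  match hs : splitC '.' ch with
  | [] => exact absurd hs (splitC_ne_nil '.' ch)
  | p0 :: rest =>
    have hjoin := splitC_join '.' ch p0 rest hs
    have hmem := splitC_mem '.' ch
    have hfree0 : ∀ c ∈ p0, c ≠ '.' ∧ c ≠ ',' := by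
      intro c hc
      have := hmem p0 (by rw [hs]; exact List.mem_cons_self) c hc
      exact ⟨this.2, hcomma c this.1⟩
    have hfree : ∀ p ∈ rest, ∀ c ∈ p, c ≠ '.' ∧ c ≠ ',' := by
      intro p hp c hc
      have := hmem p (by rw [hs]; exact List.mem_cons_of_mem _ hp) c hc
      exact ⟨this.2, hcomma c this.1⟩
    have hun : unesc ch = unescLoop rest p0 := by
      rw [unesc, hs]
    rw [hun]
    conv_lhs => rw [hjoin]
    rw [List.append_assoc, g_lit p0 hfree0]
    exact unescLoop_g rest p0 hfree token rest0 hok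

-- the top merge loop against A's machine
theorem mergeLoop_g : ∀ (rest : List (List Char)) (ch : List Char),
    (∀ c ∈ ch, c ≠ ',') → (∀ p ∈ rest, ∀ c ∈ p, c ≠ ',') →
    ∀ (res : List String) (token : List Char),
    res ++ g (ch ++ tj ',' rest) token = mergeLoop (ch :: rest) res token := by
  intro rest
  induction rest with
  | nil =>
    intro ch hch _ res token
    have hg := g_chunk ch hch token [] (Or.inl rfl)
    simp only [List.append_nil] at hg
    simp [mergeLoop, tj, hg]
  | cons ch2 rest' ih =>
    intro ch hch hrest res token
    have hch2 : ∀ c ∈ ch2, c ≠ ',' := hrest ch2 List.mem_cons_self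
    have hrest' : ∀ p ∈ rest', ∀ c ∈ p, c ≠ ',' := fun p hp => hrest p (List.mem_cons_of_mem _ hp)
    have hg := g_chunk ch hch token (tj ',' (ch2 :: rest')) (by right; exact ⟨ch2 ++ tj ',' rest', by simp [tj]⟩)
    conv_rhs => rw [mergeLoop]
    by_cases hop : (unesc ch).2
    · rw [hg]
      simp only [tj] at *
      simp only [hop, List.isEmpty_cons, Bool.not_false, Bool.and_true, if_true, reduceIte]
      exact ih ch2 hch2 hrest' res (token ++ (unesc ch).1 ++ [','])
    · rw [hg]
      simp only [tj] at *
      simp only [hop, List.isEmpty_cons, Bool.not_false, Bool.and_true, Bool.false_eq_true,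
        if_false, reduceIte]
      rw [← ih ch2 hch2 hrest' (res ++ [String.ofList (token ++ (unesc ch).1)]) []]
      simp

-- ===== VERDICT (by name: the statement is the Claim_ definition above) =====
theorem iterdecode_spec : Claim_equal_iterdecode := by
  intro value _
  unfold Spec_iterdecode iterdecode iterdecode_alt
  split
  · rfl
  · rename_i hne
    match hsp : splitC ',' value.toList with
    | [] => exact absurd hsp (splitC_ne_nil ',' value.toList)
    | ch :: rest =>
      have hj := splitC_join ',' value.toList ch rest hsp
      have hmem := splitC_mem ',' value.toList
      rw [iterLoopA_eq_g, hj]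
      simp only [List.nil_append]
      simpa using mergeLoop_g rest ch
        (fun c hc => (hmem ch (by rw [hsp]; exact List.mem_cons_self) c hc).2)
        (fun p hp c hc => (hmem p (by rw [hsp]; exact List.mem_cons_of_mem _ hp) c hc).2)
        [] []
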